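-- pv_equiv track=rewrite | github.com/oucsealee/scipysample | appearSpaceTimes.py | get_appear_space_times
-- ===== SOURCE A (Python) =====
-- def get_appear_space_times(list_numbers):
--     """
--     :param list_numbers: 每行33个元素，其中选中的值为1，未选中的值为0
--     :return:
--     """
--     list_numbers = map(list, zip(*list_numbers))
--
--     list_space = []
--     for one_ball in enumerate(list_numbers):
--         list_one_space = []
--         start_index = 0
--         for index, x in enumerate(one_ball[1]):
--             if index == 0:
--                 if x == 0:
--                     start_index -= 1
--                 continue
--             if x == 1:
--                 space = index- start_index- 1
--                 list_one_space.append(space)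
--                 start_index = index
--         list_space.append(list_one_space)
--     return list_space
-- ===== SOURCE B (Python) =====
-- def get_appear_space_times(list_numbers):
--     result = []
--     for col in zip(*list_numbers):
--         # drop the leading element iff it is nonzero (a leading 1 opens no gap;
--         # a leading 0 counts toward the first gap)
--         seq = col if col[0] == 0 else col[1:]
--         runs, cur = [], []
--         for x in seq:
--             if x == 1:
--                 runs.append(cur)
--                 cur = []
--             else:
--                 cur.append(x)
--         result.append([len(r) for r in runs])
--     return result
-- ===== Notes on version B (the rewrite author's own statement) =====
-- stated objective: alternative
-- what changed: Instead of scanning each column with enumerate and subtracting remembered indices of the previous 1, B normalizes the column head, splits the column into the runs of non-1 elements terminated by a 1, and returns the run lengths; no indices are computed at all.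
import Mathlib
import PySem

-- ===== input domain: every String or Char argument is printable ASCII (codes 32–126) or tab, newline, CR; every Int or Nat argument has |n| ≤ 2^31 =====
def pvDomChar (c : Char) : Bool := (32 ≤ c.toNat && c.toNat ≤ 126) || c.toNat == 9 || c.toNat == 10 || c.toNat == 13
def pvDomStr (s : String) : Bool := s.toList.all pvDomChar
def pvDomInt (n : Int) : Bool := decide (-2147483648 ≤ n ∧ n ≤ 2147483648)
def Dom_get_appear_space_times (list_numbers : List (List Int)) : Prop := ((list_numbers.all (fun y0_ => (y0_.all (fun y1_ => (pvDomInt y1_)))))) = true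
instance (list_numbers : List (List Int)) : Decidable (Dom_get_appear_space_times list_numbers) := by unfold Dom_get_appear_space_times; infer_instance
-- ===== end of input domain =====

-- B replaces A's index-arithmetic scan by splitting each column into runs of non-1 elements terminated by a 1 and taking their lengths; objective: alternative decomposition (same cost).
-- ===== PORT A =====
-- port of zip(*list_numbers) followed by map(list, ...): columns up to the shortest row
def pvZipT (rows : List (List Int)) : List (List Int) :=
  match (rows.map List.length).min? with
  | none => []
  | some m => (List.range m).map (fun j => rows.map (fun row => row.getD j 0))

def pvStepA (s : List Int × Int) (ix : Int × Int) : List Int × Int :=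
  if ix.1 == 0 then
    (s.1, if ix.2 == 0 then s.2 - 1 else s.2)
  else if ix.2 == 1 then (s.1 ++ [ix.1 - s.2 - 1], ix.1)
  else s

def get_appear_space_times (list_numbers : List (List Int)) : List (List Int) :=
  (pvZipT list_numbers).foldl
    (fun list_space one_ball =>
      list_space ++ [((PySem.List.enumerate one_ball 0).foldl pvStepA ([], 0)).1])
    []

-- ===== PORT B =====
-- one step of Source B's run-splitting loop: a 1 closes the current run, anything else extends it
def pvBStep (s : List (List Int) × List Int) (x : Int) : List (List Int) × List Int :=
  if x == 1 then (s.1 ++ [s.2], []) else (s.1, s.2 ++ [x])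

def pvGapsCol (col : List Int) : List Int :=
  -- col[0]: columns produced by zip are nonempty, so headD's default is never used
  let seq := if col.headD 0 == 0 then col else col.drop 1
  ((seq.foldl pvBStep ([], [])).1).map (fun r => (r.length : Int))

def get_appear_space_times_alt (list_numbers : List (List Int)) : List (List Int) :=
  (pvZipT list_numbers).map pvGapsCol

-- ===== PRECONDITION & SPEC =====
def Spec_get_appear_space_times (list_numbers : List (List Int)) (out : List (List Int)) : Prop := out = get_appear_space_times_alt list_numbers
instance (list_numbers : List (List Int)) (out : List (List Int)) : Decidable (Spec_get_appear_space_times list_numbers out) := by unfold Spec_get_appear_space_times; infer_instance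

-- ===== CLAIM (what is proved, stated in full; the proofs are below) =====
def Claim_equal_get_appear_space_times : Prop := ∀ (list_numbers : List (List Int)), Dom_get_appear_space_times list_numbers → Spec_get_appear_space_times list_numbers (get_appear_space_times list_numbers)

-- ===== LEMMAS AND PROOFS =====

-- B's fold only appends to the list of finished runs
lemma pvB_factor (l : List Int) : ∀ (rs : List (List Int)) (cur : List Int),
    l.foldl pvBStep (rs, cur)
      = (rs ++ (l.foldl pvBStep ([], cur)).1, (l.foldl pvBStep ([], cur)).2) := by
  induction l with
  | nil => intro rs cur; simp
  | cons x tl ih =>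
    intro rs cur
    by_cases hx : x = 1
    · simp only [List.foldl_cons, pvBStep, hx, beq_self_eq_true, if_true, List.nil_append]
      rw [ih (rs ++ [cur]) [], ih [cur] []]
      simp
    · have hx' : (x == 1) = false := by simp [hx]
      simp only [List.foldl_cons, pvBStep, hx', Bool.false_eq_true, if_false, List.nil_append]
      exact ih rs (cur ++ [x])

-- invariant: A's remembered index of the last 1 equals i - 1 - |cur|, and the
-- pending run cur holds exactly the elements since the last 1
lemma pv_main (l : List Int) : ∀ (i : Int), 1 ≤ i → ∀ (acc : List Int) (cur : List Int) (st : Int),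
    st = i - 1 - cur.length →
    ((PySem.List.enumerate l i).foldl pvStepA (acc, st)).1
      = acc ++ ((l.foldl pvBStep ([], cur)).1).map (fun r => (r.length : Int)) := by
  induction l with
  | nil => intro i hi acc cur st hst; simp [PySem.List.enumerate]
  | cons x tl ih =>
    intro i hi acc cur st hst
    rw [PySem.List.enumerate_cons]
    have hne : (i == 0) = false := beq_eq_false_iff_ne.mpr (by omega)
    by_cases hx : x = 1
    · have h1 : pvStepA (acc, st) (i, x) = (acc ++ [(cur.length : Int)], i) := by
        simp only [pvStepA, hne, hx, Bool.false_eq_true, if_false, beq_self_eq_true, if_true]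
        have : i - st - 1 = (cur.length : Int) := by omega
        rw [this]
      simp only [List.foldl_cons, h1]
      rw [ih (i + 1) (by omega) (acc ++ [(cur.length : Int)]) [] i (by simp)]
      simp only [pvBStep, hx, beq_self_eq_true, if_true, List.nil_append]
      rw [pvB_factor tl [cur] []]
      simp
    · have hx' : (x == 1) = false := by simp [hx]
      have h1 : pvStepA (acc, st) (i, x) = (acc, st) := by
        simp [pvStepA, hne, hx']
      simp only [List.foldl_cons, h1, pvBStep, hx', Bool.false_eq_true, if_false,
        List.nil_append]
      exact ih (i + 1) (by omega) acc (cur ++ [x]) st (by simp; omega)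

lemma pv_col_eq (col : List Int) :
    ((PySem.List.enumerate col 0).foldl pvStepA ([], 0)).1 = pvGapsCol col := by
  cases col with
  | nil => simp [PySem.List.enumerate, pvGapsCol]
  | cons x0 rest =>
    rw [PySem.List.enumerate_cons]
    unfold pvGapsCol
    simp only [List.headD_cons, List.drop_one, List.tail_cons, List.foldl_cons]
    by_cases hx0 : x0 = 0
    · subst hx0
      have hA : pvStepA ([], 0) ((0 : Int), (0 : Int)) = ([], -1) := by
        simp [pvStepA]
      have hB : pvBStep ([], []) (0 : Int) = ([], [(0 : Int)]) := by
        simp [pvBStep]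
      simp only [hA, beq_self_eq_true, if_true, List.foldl_cons, hB, zero_add]
      exact pv_main rest 1 (by omega) [] [0] (-1) (by simp)
    · have hx0' : (x0 == 0) = false := by simp [hx0]
      have hA : pvStepA ([], 0) ((0 : Int), x0) = ([], 0) := by
        simp [pvStepA, hx0']
      simp only [hA, hx0', Bool.false_eq_true, if_false, zero_add]
      exact pv_main rest 1 (by omega) [] [] 0 (by simp)

-- ===== VERDICT (by name: the statement is the Claim_ definition above) =====
theorem get_appear_space_times_spec : Claim_equal_get_appear_space_times := by
  intro ln _
  unfold Spec_get_appear_space_times get_appear_space_times get_appear_space_times_alt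
  rw [PySem.List.foldl_append_singleton_eq_map]
  exact List.map_congr_left (fun col _ => pv_col_eq col)
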